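-- pv_equiv track=rewrite | github.com/Silence-Rain/Algorithmic_Programming_Practice | Twitter_2020_Intern/twitter.py | getUniqueUserIdSum
-- ===== SOURCE A (Python) =====
-- from collections import Counter
--
-- def getUniqueUserIdSum(arr):
--     total = 0
--     cnts = Counter(arr)
--
--     for i in range(len(arr)):
--         if cnts[arr[i]] > 1:
--             temp = arr[i] + 1
--             while temp in cnts:
--                 temp += 1
--
--             total += temp
--             cnts[temp] = 1
--             cnts[arr[i]] -= 1
--
--             arr[i] = temp
--
--         else:
--             total += i
--
--     return total
-- ===== SOURCE B (Python) =====
-- def getUniqueUserIdSum(arr):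
--     # Union-find "next free integer" with path compression, last-occurrence precomputation.
--     used = set(arr)
--     last = {}
--     for i, v in enumerate(arr):
--         last[v] = i
--     nxt = {}
--     total = 0
--     for i in range(len(arr)):
--         v = arr[i]
--         if last[v] == i:
--             total += i
--         else:
--             x = v + 1
--             path = []
--             while x in used:
--                 path.append(x)
--                 x = nxt.get(x, x + 1)
--             for p in path:
--                 nxt[p] = x
--             total += x
--             used.add(x)
--             arr[i] = x
--     return total
-- ===== Notes on version B (the rewrite author's own statement) =====
-- stated objective: faster
-- what changed: Replaces the dynamic Counter (decrement-per-duplicate, linear re-scan 'temp+=1 while temp in cnts' for every duplicate) by a precomputed last-occurrence index plus a union-find 'next free integer' structure with path compression, so repeated scans over the same run of taken ids collapse to amortized near-constant jumps.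
import Mathlib
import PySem

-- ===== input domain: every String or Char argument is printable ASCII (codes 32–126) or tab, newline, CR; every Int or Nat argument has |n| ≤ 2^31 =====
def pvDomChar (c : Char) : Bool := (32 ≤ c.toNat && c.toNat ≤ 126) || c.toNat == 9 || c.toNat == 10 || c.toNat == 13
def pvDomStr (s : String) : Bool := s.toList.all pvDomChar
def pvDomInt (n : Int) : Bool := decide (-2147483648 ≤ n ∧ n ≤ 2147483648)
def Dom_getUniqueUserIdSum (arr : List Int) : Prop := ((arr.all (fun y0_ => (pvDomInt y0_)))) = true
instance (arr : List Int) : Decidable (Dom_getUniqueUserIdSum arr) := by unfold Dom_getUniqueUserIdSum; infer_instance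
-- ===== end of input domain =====

-- B replaces A's per-duplicate linear re-scan by a precomputed last-occurrence index and a
-- union-find "next free integer" with path compression (measured faster on duplicate-heavy input).
-- Both A and B mutate arr in place identically (arr[i] = reassigned id); the equivalence proved
-- here is about the return value.

-- ===== PORT A =====
-- termination measure lemma for the 'while temp in cnts: temp += 1' loop (cited by decreasing_by)
theorem pvFilterLt (l : List Int) (t : Int) (h : t ∈ l) :
    (l.filter (fun k => decide (t + 1 ≤ k))).length < (l.filter (fun k => decide (t ≤ k))).length := by
  rw [← List.countP_eq_length_filter, ← List.countP_eq_length_filter]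
  induction l with
  | nil => cases h
  | cons a tl ih =>
    rw [List.countP_cons, List.countP_cons]
    have hmono : tl.countP (fun k => decide (t + 1 ≤ k)) ≤ tl.countP (fun k => decide (t ≤ k)) :=
      List.countP_mono_left (fun x _ hx => by simp at hx ⊢; omega)
    have hite : (if (decide (t + 1 ≤ a) : Bool) = true then 1 else 0) ≤
        (if (decide (t ≤ a) : Bool) = true then 1 else 0) := by
      split_ifs with h1 h2 <;> simp_all
      omega
    rcases List.mem_cons.1 h with rfl | htl
    · have e1 : (if (decide (t + 1 ≤ t) : Bool) = true then 1 else 0) = 0 := by norm_num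
      have e2 : (if (decide (t ≤ t) : Bool) = true then 1 else 0) = 1 := by norm_num
      rw [e1, e2]
      omega
    · exact Nat.add_lt_add_of_lt_of_le (ih htl) hite

-- 'temp = arr[i] + 1; while temp in cnts: temp += 1'
def pvNextTaken (cnts : PySem.Dict Int Int) (t : Int) : Int :=
  if cnts.contains t then pvNextTaken cnts (t + 1) else t
termination_by (cnts.keys.filter (fun k => decide (t ≤ k))).length
decreasing_by
  exact pvFilterLt cnts.keys t ((PySem.Dict.contains_iff_mem_keys _ _).1 (by assumption))

-- one iteration of A's for-loop; state = (arr, cnts, total)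
def pvStepA (st : List Int × PySem.Dict Int Int × Int) (i : Nat) :
    List Int × PySem.Dict Int Int × Int :=
  match st with
  | (a, cnts, total) =>
    let v := a.getD i 0
    if cnts.getD v 0 > 1 then
      let temp := pvNextTaken cnts (v + 1)
      (a.set i temp, (cnts.insert temp 1).modify v 0 (· - 1), total + temp)
    else
      (a, cnts, total + (i : Int))

def getUniqueUserIdSum (arr : List Int) : Int :=
  ((List.range arr.length).foldl pvStepA (arr, PySem.Dict.counter arr, 0)).2.2

-- ===== PORT B =====
-- last = {}; for i, v in enumerate(arr): last[v] = i
def pvLast (xs : List Int) : PySem.Dict Int Int :=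
  (PySem.List.enumerate xs).foldl (fun d p => d.insert p.2 p.1) PySem.Dict.empty

-- 'x = v + 1; path = []; while x in used: path.append(x); x = nxt.get(x, x + 1)'
-- (fuel is a totality guard only: used.length + 1 always suffices, proved in the lemmas below)
def pvFind (used : PySem.Set Int) (nxt : PySem.Dict Int Int) :
    Nat → Int → List Int → Int × List Int
  | 0, x, path => (x, path)
  | (fuel + 1), x, path =>
    if PySem.Set.contains used x then
      pvFind used nxt fuel (nxt.getD x (x + 1)) (path ++ [x])
    else (x, path)

-- one iteration of B's for-loop; state = (arr, used, nxt, total)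
def pvStepB (last : PySem.Dict Int Int)
    (st : List Int × PySem.Set Int × PySem.Dict Int Int × Int) (i : Nat) :
    List Int × PySem.Set Int × PySem.Dict Int Int × Int :=
  match st with
  | (a, used, nxt, total) =>
    let v := a.getD i 0
    if last.getD v 0 = (i : Int) then
      (a, used, nxt, total + (i : Int))
    else
      let fp := pvFind used nxt (used.length + 1) (v + 1) []
      (a.set i fp.1, PySem.Set.add used fp.1,
        fp.2.foldl (fun d p => d.insert p fp.1) nxt, total + fp.1)

def getUniqueUserIdSum_alt (arr : List Int) : Int :=
  ((List.range arr.length).foldl (pvStepB (pvLast arr))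
      (arr, PySem.Set.ofList arr, PySem.Dict.empty, 0)).2.2.2

-- ===== PRECONDITION & SPEC =====
def Spec_getUniqueUserIdSum (arr : List Int) (out : Int) : Prop := out = getUniqueUserIdSum_alt arr
instance (arr : List Int) (out : Int) : Decidable (Spec_getUniqueUserIdSum arr out) := by unfold Spec_getUniqueUserIdSum; infer_instance

-- ===== CLAIM (what is proved, stated in full; the proofs are below) =====
def Claim_equal_getUniqueUserIdSum : Prop := ∀ (arr : List Int), Dom_getUniqueUserIdSum arr → Spec_getUniqueUserIdSum arr (getUniqueUserIdSum arr)

-- ===== LEMMAS AND PROOFS =====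

-- naive "smallest integer >= t outside S" (reference characterisation of both searches)
def pvNF (S : List Int) (t : Int) : Int :=
  if t ∈ S then pvNF S (t + 1) else t
termination_by (S.filter (fun k => decide (t ≤ k))).length
decreasing_by exact pvFilterLt S t (by assumption)

theorem pvNF_spec (S : List Int) (t : Int) :
    t ≤ pvNF S t ∧ pvNF S t ∉ S ∧ ∀ r, t ≤ r → r < pvNF S t → r ∈ S := by
  induction t using pvNF.induct S with
  | case1 t h ih =>
    rw [pvNF, if_pos h]
    refine ⟨by omega, ih.2.1, ?_⟩
    intro r hr1 hr2
    by_cases hrt : r = t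
    · exact hrt ▸ h
    · exact ih.2.2 r (by omega) hr2
  | case2 t h =>
    rw [pvNF, if_neg h]
    exact ⟨le_refl _, h, fun r h1 h2 => absurd h2 (by omega)⟩
theorem pvNextTaken_eq (cnts : PySem.Dict Int Int) (t : Int) :
    pvNextTaken cnts t = pvNF cnts.keys t := by
  induction t using pvNextTaken.induct cnts with
  | case1 t h ih =>
    rw [pvNextTaken, if_pos h, pvNF, if_pos ((PySem.Dict.contains_iff_mem_keys _ _).1 h), ih]
  | case2 t h =>
    rw [pvNextTaken, if_neg h, pvNF,
      if_neg (fun hm => h ((PySem.Dict.contains_iff_mem_keys _ _).2 hm))]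
-- the nxt-dict invariant: every shortcut jumps forward and skips only used integers
def pvInvN (S : List Int) (nxt : PySem.Dict Int Int) : Prop :=
  ∀ p q, nxt.get? p = some q → p < q ∧ ∀ r, p < r → r < q → r ∈ S

theorem pvFind_main (S : List Int) (nxt : PySem.Dict Int Int) (m : Int)
    (hInv : pvInvN S nxt) (hm : m ∉ S) :
    ∀ (fuel : Nat) (x : Int) (path : List Int), x ≤ m →
    (∀ r, x ≤ r → r < m → r ∈ S) →
    (S.filter (fun k => decide (x ≤ k))).length < fuel →
    (pvFind S nxt fuel x path).1 = m ∧
      ∀ p ∈ (pvFind S nxt fuel x path).2, p ∈ path ∨ (p < m ∧ p ∈ S ∧ ∀ r, p < r → r < m → r ∈ S) := by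
  intro fuel
  induction fuel with
  | zero => intro x path _ _ hf; omega
  | succ fuel ih =>
    intro x path hxm hcov hf
    by_cases hx : x ∈ S
    · have hcontains : PySem.Set.contains S x = true := by simp [PySem.Set.contains, hx]
      rw [pvFind, if_pos hcontains]
      have hxltm : x < m := lt_of_le_of_ne hxm (fun he => hm (he ▸ hx))
      -- the next probe x'
      set x' := nxt.getD x (x + 1) with hx'
      have hstep : x < x' ∧ ∀ r, x < r → r < x' → r ∈ S := by
        rw [hx', PySem.Dict.getD_eq_get?_getD]
        cases hq : nxt.get? x with
        | none =>
          refine ⟨by simp, ?_⟩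
          intro r h1 h2
          simp at h2
          exact absurd h2 (by omega)
        | some q =>
          have := hInv x q hq
          simpa using this
      have hx'm : x' ≤ m := by
        by_contra hgt
        exact hm (hstep.2 m hxltm (by omega))
      have hcov' : ∀ r, x' ≤ r → r < m → r ∈ S := fun r h1 h2 => hcov r (by omega) h2
      have hf' : (S.filter (fun k => decide (x' ≤ k))).length < fuel := by
        have h1 := pvFilterLt S x hx
        have h2 : (S.filter (fun k => decide (x' ≤ k))).length ≤
            (S.filter (fun k => decide (x + 1 ≤ k))).length := by
          rw [← List.countP_eq_length_filter, ← List.countP_eq_length_filter]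
          apply List.countP_mono_left
          intro r _ hr; simp at hr ⊢; omega
        omega
      have := ih x' (path ++ [x]) hx'm hcov' hf'
      refine ⟨this.1, ?_⟩
      intro p hp
      rcases this.2 p hp with hmem | hgood
      · rcases List.mem_append.1 hmem with h | h
        · exact Or.inl h
        · simp at h
          subst h
          exact Or.inr ⟨hxltm, hx, fun r h1 h2 => hcov r (by omega) h2⟩
      · exact Or.inr hgood
    · have hcontains : PySem.Set.contains S x = false := by simp [PySem.Set.contains, hx]
      rw [pvFind, if_neg (by simp [PySem.Set.contains]; exact hx)]
      have : x = m := by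
        by_contra hne
        exact hx (hcov x le_rfl (lt_of_le_of_ne hxm hne))
      exact ⟨this, fun p hp => Or.inl hp⟩

theorem pvInvN_compress (S : List Int) (nxt : PySem.Dict Int Int) (m : Int)
    (hInv : pvInvN S nxt) (path : List Int)
    (hpath : ∀ p ∈ path, p < m ∧ ∀ r, p < r → r < m → r ∈ S) :
    pvInvN (S ++ [m]) (path.foldl (fun d p => d.insert p m) nxt) := by
  have hmono : pvInvN (S ++ [m]) nxt := by
    intro p q hq
    exact ⟨(hInv p q hq).1, fun r h1 h2 => List.mem_append.2 (Or.inl ((hInv p q hq).2 r h1 h2))⟩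
  clear hInv
  induction path generalizing nxt with
  | nil => exact hmono
  | cons p tl ih =>
    simp only [List.foldl_cons]
    apply ih
    · intro a ha; exact hpath a (List.mem_cons_of_mem _ ha)
    · intro a b hb
      rw [PySem.Dict.get?_insert] at hb
      split at hb
      · rename_i hap
        have hmemp : a ∈ p :: tl := by simp [hap]
        have hgood := hpath a hmemp
        cases hb
        refine ⟨hgood.1, fun r h1 h2 => List.mem_append.2 (Or.inl (hgood.2 r h1 h2))⟩
      · exact hmono a b hb
theorem pvLast_append (ys : List Int) (x : Int) :
    pvLast (ys ++ [x]) = (pvLast ys).insert x (ys.length : Int) := by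
  unfold pvLast
  rw [PySem.List.enumerate_append, List.foldl_append]
  simp [PySem.List.enumerate]

theorem pvLast_getD (xs : List Int) (i : Nat) (hi : i < xs.length) :
    ((pvLast xs).getD (xs.getD i 0) 0 = (i : Int)) ↔ xs.getD i 0 ∉ xs.drop (i + 1) := by
  induction xs using List.reverseRecOn generalizing i with
  | nil => simp at hi
  | append_singleton ys x ih =>
    rw [pvLast_append]
    rcases Nat.lt_succ_iff_lt_or_eq.1 (by simpa using hi) with hlt | heq
    · have hget : (ys ++ [x]).getD i 0 = ys.getD i 0 := by
        rw [List.getD_append _ _ _ _ hlt]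
      have hdrop : (ys ++ [x]).drop (i + 1) = ys.drop (i + 1) ++ [x] := by
        rw [List.drop_append_of_le_length (by omega)]
      rw [hget, hdrop]
      by_cases hvx : ys.getD i 0 = x
      · rw [hvx, PySem.Dict.getD_insert]
        constructor
        · intro h
          simp at h
          exfalso
          have : i = ys.length := by exact_mod_cast h.symm
          omega
        · intro h; exfalso; exact h (by simp)
      · rw [PySem.Dict.getD_insert, if_neg hvx, ih i hlt]
        rw [List.getD_eq_getElem?_getD] at hvx
        simp only [List.mem_append, List.mem_singleton, not_or]
        tauto
    · subst heq
      have hget : (ys ++ [x]).getD ys.length 0 = x := by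
        rw [List.getD_eq_getElem?_getD, List.getElem?_concat_length]
        rfl
      have hdrop : (ys ++ [x]).drop (ys.length + 1) = [] := by
        apply List.drop_eq_nil_of_le; simp
      rw [hget, hdrop]
      simp
-- the simulation relation between the two loop states after i iterations
def pvRel (arr0 : List Int) (i : Nat)
    (sA : List Int × PySem.Dict Int Int × Int)
    (sB : List Int × PySem.Set Int × PySem.Dict Int Int × Int) : Prop :=
  sB.1 = sA.1 ∧ sB.2.2.2 = sA.2.2 ∧ sA.1.length = arr0.length ∧ sA.1.drop i = arr0.drop i ∧
  sA.2.1.keys = sB.2.1 ∧ sB.2.1.Nodup ∧ (∀ v ∈ arr0, v ∈ sB.2.1) ∧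
  (∀ v, sA.2.1.getD v 0 =
    ((arr0.drop i).count v : Int) +
      (if v ∈ sB.2.1 ∧ (arr0.drop i).count v = 0 then 1 else 0)) ∧
  pvInvN sB.2.1 sB.2.2.1

theorem pvStep_rel (arr0 : List Int) (i : Nat) (hi : i < arr0.length)
    (sA : List Int × PySem.Dict Int Int × Int)
    (sB : List Int × PySem.Set Int × PySem.Dict Int Int × Int)
    (h : pvRel arr0 i sA sB) :
    pvRel arr0 (i + 1) (pvStepA sA i) (pvStepB (pvLast arr0) sB i) := by
  obtain ⟨a, cnts, tA⟩ := sA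
  obtain ⟨b, used, nxt, tB⟩ := sB
  obtain ⟨hb, ht, hlen, hdrop, hkeys, hnd, hsub, hcnt, hInv⟩ := h
  simp only at hb ht hlen hdrop hkeys hnd hsub hcnt hInv
  have hb' := hb.symm
  have ht' := ht.symm
  subst hb' ht'
  -- the current element
  have hia : i < a.length := by omega
  have hconsA : a.drop i = a[i] :: a.drop (i + 1) := List.drop_eq_getElem_cons hia
  have hcons0 : arr0.drop i = arr0[i] :: arr0.drop (i + 1) := List.drop_eq_getElem_cons hi
  have hhead : a[i] = arr0[i] ∧ a.drop (i + 1) = arr0.drop (i + 1) := by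
    rw [hconsA, hcons0] at hdrop
    exact ⟨List.head_eq_of_cons_eq hdrop, List.tail_eq_of_cons_eq hdrop⟩
  have hget : a.getD i 0 = arr0[i] := by
    rw [List.getD_eq_getElem _ _ hia]; exact hhead.1
  set v0 := arr0[i] with hv0
  have hv0mem : v0 ∈ arr0 := List.getElem_mem hi
  have hv0used : v0 ∈ used := hsub v0 hv0mem
  -- count of the head in the suffix
  have hcount_head : (arr0.drop i).count v0 = (arr0.drop (i + 1)).count v0 + 1 := by
    rw [hcons0, List.count_cons]; simp
  have hgetD_v0 : cnts.getD v0 0 = ((arr0.drop (i + 1)).count v0 : Int) + 1 := by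
    rw [hcnt v0, hcount_head]
    push_cast
    simp
  -- branch characterizations
  have hAcond : (cnts.getD (a.getD i 0) 0 > 1) ↔ v0 ∈ arr0.drop (i + 1) := by
    rw [hget, hgetD_v0, ← List.count_pos_iff]
    constructor
    · intro hgt
      have : (0:Int) < ((arr0.drop (i + 1)).count v0 : Int) := by omega
      exact_mod_cast this
    · intro hpos
      have : (0:Int) < ((arr0.drop (i + 1)).count v0 : Int) := by exact_mod_cast hpos
      omega
  have hBcond : ((pvLast arr0).getD (a.getD i 0) 0 = (i : Int)) ↔ v0 ∉ arr0.drop (i + 1) := by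
    rw [hget]
    have := pvLast_getD arr0 i hi
    rwa [List.getD_eq_getElem _ _ hi] at this
  by_cases hmem : v0 ∈ arr0.drop (i + 1)
  · -- duplicate branch: A reassigns, B reassigns via find
    have hA : cnts.getD (a.getD i 0) 0 > 1 := hAcond.2 hmem
    have hB : ¬ ((pvLast arr0).getD (a.getD i 0) 0 = (i : Int)) := fun hc => (hBcond.1 hc) hmem
    rw [pvStepA, pvStepB]
    simp only [if_pos hA, if_neg hB]
    set m := pvNF used (v0 + 1) with hm
    have hnf := pvNF_spec used (v0 + 1)
    have hmnot : m ∉ used := hnf.2.1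
    have htempA : pvNextTaken cnts (a.getD i 0 + 1) = m := by
      rw [hget, pvNextTaken_eq, hkeys, hm]
    have hfind := pvFind_main used nxt m hInv hmnot (used.length + 1) (a.getD i 0 + 1) []
      (by rw [hget]; exact hnf.1)
      (by rw [hget]; exact hnf.2.2)
      (by have := List.length_filter_le (fun k => decide (a.getD i 0 + 1 ≤ k)) used; omega)
    have hfp1 : (pvFind used nxt (used.length + 1) (a.getD i 0 + 1) []).1 = m := hfind.1
    have hpath : ∀ p ∈ (pvFind used nxt (used.length + 1) (a.getD i 0 + 1) []).2,
        p < m ∧ ∀ r, p < r → r < m → r ∈ used := by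
      intro p hp
      rcases hfind.2 p hp with hc | hc
      · cases hc
      · exact ⟨hc.1, hc.2.2⟩
    have hmnotin0 : m ∉ arr0 := fun hc => hmnot (hsub m hc)
    have hv0nem : v0 ≠ m := fun he => hmnot (he ▸ hv0used)
    have haddm : PySem.Set.add used m = used ++ [m] := by
      simp [PySem.Set.add, PySem.Set.contains, hmnot]
    have hmcont : cnts.contains m = false := by
      cases hcm : cnts.contains m with
      | false => rfl
      | true => exact absurd (hkeys ▸ (PySem.Dict.contains_iff_mem_keys cnts m).1 hcm) hmnot
    have hkeysins : (cnts.insert m 1).keys = used ++ [m] := by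
      rw [PySem.Dict.keys_insert_of_not_contains _ _ hmcont, hkeys]
    have hv0cont : (cnts.insert m 1).contains (a.getD i 0) = true := by
      rw [PySem.Dict.contains_iff_mem_keys, hkeysins, hget]
      exact List.mem_append.2 (Or.inl hv0used)
    have hkeysnew : ((cnts.insert m 1).modify (a.getD i 0) 0 (· - 1)).keys = used ++ [m] := by
      rw [PySem.Dict.keys_modify, PySem.Dict.keys_insert_of_contains _ _ hv0cont, hkeysins]
    rw [pvRel]
    dsimp only
    rw [htempA, hfp1, haddm]
    refine ⟨rfl, rfl, by rw [List.length_set]; exact hlen, ?_, hkeysnew, ?_, ?_, ?_, ?_⟩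
    · -- drop of set
      rw [List.drop_set, if_pos (by omega)]
      exact hhead.2
    · -- nodup
      rw [List.nodup_append]
      refine ⟨hnd, List.nodup_singleton m, ?_⟩
      intro p hp q hq
      simp only [List.mem_singleton] at hq
      subst hq
      exact fun he => hmnot (he ▸ hp)
    · -- arr0 ⊆ used ++ [m]
      intro w hw
      exact List.mem_append.2 (Or.inl (hsub w hw))
    · -- count invariant
      intro w
      rw [hget, PySem.Dict.getD_modify]
      by_cases hw1 : w = v0
      · subst hw1
        rw [if_pos rfl, PySem.Dict.getD_insert, if_neg hv0nem, hgetD_v0]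
        have hpos : 0 < (arr0.drop (i + 1)).count v0 := List.count_pos_iff.2 hmem
        rw [if_neg (by intro hc; omega)]
        ring
      · rw [if_neg hw1, PySem.Dict.getD_insert]
        by_cases hw2 : w = m
        · subst hw2
          rw [if_pos rfl]
          have hcnt0 : (arr0.drop (i + 1)).count m = 0 := by
            rw [List.count_eq_zero]
            intro hc
            exact hmnotin0 (List.mem_of_mem_drop hc)
          rw [hcnt0, if_pos ⟨List.mem_append.2 (Or.inr (by simp)), rfl⟩]
          simp
        · rw [if_neg hw2, hcnt w]
          have hcc : (arr0.drop (i + 1)).count w = (arr0.drop i).count w := by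
            rw [hcons0, List.count_cons, if_neg (by simp only [beq_iff_eq]; exact fun h => hw1 h.symm)]
            omega
          rw [hcc]
          have hmm : (w ∈ used ++ [m]) ↔ w ∈ used := by
            simp [List.mem_append, hw2]
          by_cases hcnd : w ∈ used ∧ (arr0.drop i).count w = 0
          · rw [if_pos hcnd, if_pos ⟨hmm.mpr hcnd.1, hcnd.2⟩]
          · rw [if_neg hcnd, if_neg (fun hc => hcnd ⟨hmm.mp hc.1, hc.2⟩)]
    · -- InvN after compression
      exact pvInvN_compress used nxt m hInv _ hpath
  · -- last-occurrence branch: both add i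
    have hA : ¬ (cnts.getD (a.getD i 0) 0 > 1) := fun hc => hmem (hAcond.1 hc)
    have hB : (pvLast arr0).getD (a.getD i 0) 0 = (i : Int) := hBcond.2 hmem
    rw [pvStepA, pvStepB]
    simp only [if_neg hA, if_pos hB]
    rw [pvRel]
    dsimp only
    refine ⟨rfl, rfl, hlen, hhead.2, hkeys, hnd, hsub, ?_, hInv⟩
    intro w
    rw [hcnt w]
    by_cases hw1 : w = v0
    · subst hw1
      have hc1 : (arr0.drop (i + 1)).count v0 = 0 := by
        rw [List.count_eq_zero]; exact hmem
      rw [hcount_head, hc1]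
      simp [hv0used]
    · have hcc : (arr0.drop i).count w = (arr0.drop (i + 1)).count w := by
        rw [hcons0, List.count_cons, if_neg (by simp only [beq_iff_eq]; exact fun h => hw1 h.symm)]
        omega
      rw [hcc]
theorem pvLoop_rel (arr0 : List Int) (k i : Nat) (hk : i + k = arr0.length)
    (sA : List Int × PySem.Dict Int Int × Int)
    (sB : List Int × PySem.Set Int × PySem.Dict Int Int × Int)
    (h : pvRel arr0 i sA sB) :
    pvRel arr0 arr0.length ((List.range' i k).foldl pvStepA sA)
      ((List.range' i k).foldl (pvStepB (pvLast arr0)) sB) := by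
  induction k generalizing i sA sB with
  | zero =>
    have : i = arr0.length := by omega
    subst this
    simpa using h
  | succ k ih =>
    rw [List.range'_succ]
    simp only [List.foldl_cons]
    exact ih (i + 1) (by omega) _ _ (pvStep_rel arr0 i (by omega) _ _ h)



theorem pvMain (arr : List Int) : getUniqueUserIdSum arr = getUniqueUserIdSum_alt arr := by
  have h0 : pvRel arr 0 (arr, PySem.Dict.counter arr, 0)
      (arr, PySem.Set.ofList arr, PySem.Dict.empty, 0) := by
    rw [pvRel]
    dsimp only
    refine ⟨rfl, rfl, rfl, rfl, PySem.Dict.keys_counter arr, PySem.Set.nodup_ofList arr, ?_, ?_, ?_⟩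
    · intro v hv
      exact (PySem.Set.mem_ofList arr v).2 hv
    · intro v
      rw [PySem.Dict.getD_counter, List.drop_zero]
      by_cases hc : arr.count v = 0
      · rw [hc, if_neg (fun h => (List.count_eq_zero.1 hc) ((PySem.Set.mem_ofList arr v).1 h.1))]
        simp
      · rw [if_neg (fun h => hc h.2)]
        simp
    · intro p q hq
      rw [PySem.Dict.get?_empty] at hq
      cases hq
  have := pvLoop_rel arr arr.length 0 (by omega) _ _ h0
  rw [getUniqueUserIdSum, getUniqueUserIdSum_alt, List.range_eq_range']
  exact this.2.1.symm

-- ===== VERDICT (by name: the statement is the Claim_ definition above) =====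
theorem getUniqueUserIdSum_spec : Claim_equal_getUniqueUserIdSum := by
  intro arr _
  exact pvMain arr
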